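-- pv_equiv track=rewrite | github.com/Japneet001/Ninja-Slayground | DAY 11 - Crazy Numbers/1 Crazy Numbers.py | numberPattern
-- ===== SOURCE A (Python) =====
-- def numberPattern(n):
--     a = 1
--     b = []
--     for i in range(n - 1, -1, -1):
--         c = []
--         for j in range(n):
--             if j < i:
--                 c.append(-1)
--             else:
--                 c.append(a)
--                 a += 1
--                 if a == 10:
--                     a = 1
--         b.append(c)
--     return b
-- ===== SOURCE B (Python) =====
-- def numberPattern(n):
--     # Row r (0-based) has n-1-r leading -1 cells, then r+1 filled cells.
--     # The t-th filled cell overall (0-based) holds t % 9 + 1; row r starts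
--     # at the triangular number r*(r+1)//2, so no running counter is needed.
--     return [[-1] * (n - 1 - r)
--             + [(r * (r + 1) // 2 + k) % 9 + 1 for k in range(r + 1)]
--             for r in range(n)]
-- ===== Notes on version B (the rewrite author's own statement) =====
-- stated objective: simpler
-- what changed: Replaces A's cross-row mutable counter (threaded through nested loops with an explicit wrap-at-10 reset) by a per-row comprehension that computes each cell in closed form from the triangular base r*(r+1)//2 via (base+k)%9+1.
import Mathlib
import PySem

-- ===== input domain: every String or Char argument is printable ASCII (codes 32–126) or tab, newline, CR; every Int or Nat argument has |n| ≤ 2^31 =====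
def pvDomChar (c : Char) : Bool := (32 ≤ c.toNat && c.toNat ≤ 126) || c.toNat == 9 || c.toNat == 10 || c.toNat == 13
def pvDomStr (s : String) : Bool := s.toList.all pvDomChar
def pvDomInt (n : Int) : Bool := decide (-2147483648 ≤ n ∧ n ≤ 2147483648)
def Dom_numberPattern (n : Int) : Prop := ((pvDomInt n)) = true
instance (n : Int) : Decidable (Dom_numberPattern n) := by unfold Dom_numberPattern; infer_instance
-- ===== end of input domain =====

-- B replaces A's cross-row threaded 1..9 counter by a per-row closed-form comprehension (simpler decomposition, same cost).

-- ===== PORT A =====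
-- inner loop body of A: if j < i append -1, else append the counter and advance it (wrap 10 -> 1)
def pvInnerStep (i : Int) (t : Int × List Int) (j : Int) : Int × List Int :=
  if j < i then (t.1, t.2 ++ [-1])
  else
    let a' := t.1 + 1
    let a' := if a' = 10 then 1 else a'
    (a', t.2 ++ [t.1])

-- outer loop body of A: run the inner loop on a fresh row, append the row
def pvOuterStep (n : Int) (s : Int × List (List Int)) (i : Int) : Int × List (List Int) :=
  let inner := (PySem.List.pyRange 0 n 1).foldl (pvInnerStep i) (s.1, [])
  (inner.1, s.2 ++ [inner.2])

def numberPattern (n : Int) : List (List Int) :=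
  ((PySem.List.pyRange (n - 1) (-1) (-1)).foldl (pvOuterStep n) (1, [])).2

-- ===== PORT B =====
def pvRow (n r : Int) : List Int :=
  List.replicate (n - 1 - r).toNat (-1 : Int) ++
    (PySem.List.pyRange 0 (r + 1) 1).map (fun k =>
      PySem.Int.mod (PySem.Int.floordiv (r * (r + 1)) 2 + k) 9 + 1)

def numberPattern_alt (n : Int) : List (List Int) :=
  (PySem.List.pyRange 0 n 1).map (pvRow n)

-- ===== PRECONDITION & SPEC =====
def Spec_numberPattern (n : Int) (out : List (List Int)) : Prop := out = numberPattern_alt n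
instance (n : Int) (out : List (List Int)) : Decidable (Spec_numberPattern n out) := by unfold Spec_numberPattern; infer_instance

-- ===== CLAIM (what is proved, stated in full; the proofs are below) =====
def Claim_equal_numberPattern : Prop := ∀ (n : Int), Dom_numberPattern n → Spec_numberPattern n (numberPattern n)

-- ===== LEMMAS AND PROOFS =====

-- the counter value after t cells have been filled
def pvWrap (t : Nat) : Int := ((t % 9 : Nat) : Int) + 1

-- triangular number: cells filled before row r
def pvT (r : Nat) : Nat := r * (r + 1) / 2

theorem pvWrap_step (t : Nat) :
    (if pvWrap t + 1 = 10 then (1 : Int) else pvWrap t + 1) = pvWrap (t + 1) := by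
  unfold pvWrap
  have h1 : t % 9 < 9 := Nat.mod_lt t (by omega)
  have h2 : (t + 1) % 9 < 9 := Nat.mod_lt (t + 1) (by omega)
  split_ifs with h
  · have : t % 9 = 8 := by omega
    have : (t + 1) % 9 = 0 := by omega
    omega
  · have : t % 9 ≠ 8 := by omega
    have : (t + 1) % 9 = t % 9 + 1 := by omega
    omega

theorem pvT_succ (r : Nat) : pvT r + (r + 1) = pvT (r + 1) := by
  unfold pvT
  obtain ⟨c, hc⟩ := Nat.even_mul_succ_self r
  have h2 : (r + 1) * (r + 1 + 1) = r * (r + 1) + 2 * (r + 1) := by ring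
  omega

theorem pvWrap_eq_mod (t : Nat) : PySem.Int.mod ((t : Nat) : Int) 9 + 1 = pvWrap t := by
  unfold pvWrap
  exact_mod_cast congrArg (· + (1 : Int)) (PySem.Int.mod_natCast t 9)

-- inner loop, skip phase: every j < i, so only -1 cells are appended
theorem inner_skip (i : Int) (xs : List Int) (h : ∀ j ∈ xs, j < i) :
    ∀ (a : Int) (c : List Int),
      xs.foldl (pvInnerStep i) (a, c) = (a, c ++ List.replicate xs.length (-1)) := by
  induction xs with
  | nil => intro a c; simp
  | cons x xs ih =>
    intro a c
    have hx : x < i := h x (List.mem_cons_self)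
    simp only [List.foldl_cons, pvInnerStep, if_pos hx]
    rw [ih (fun j hj => h j (List.mem_cons_of_mem _ hj))]
    simp [List.replicate_succ]

-- inner loop, fill phase: every j ≥ i, counter pvWrap t advances per cell
theorem inner_fill (i : Int) (xs : List Int) (h : ∀ j ∈ xs, ¬ j < i) :
    ∀ (t : Nat) (c : List Int),
      xs.foldl (pvInnerStep i) (pvWrap t, c)
        = (pvWrap (t + xs.length),
           c ++ (List.range xs.length).map (fun k => pvWrap (t + k))) := by
  induction xs with
  | nil => intro t c; simp
  | cons x xs ih =>
    intro t c
    have hx : ¬ x < i := h x (List.mem_cons_self)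
    simp only [List.foldl_cons, pvInnerStep, if_neg hx]
    rw [pvWrap_step t, ih (fun j hj => h j (List.mem_cons_of_mem _ hj))]
    rw [Prod.mk.injEq]
    refine ⟨congrArg pvWrap (by simp; omega), ?_⟩
    rw [List.length_cons, List.range_succ_eq_map, List.map_cons, List.map_map,
        List.append_cons]
    rw [show pvWrap (t + 0) = pvWrap t from congrArg pvWrap (by omega)]
    have hmap : List.map (fun k => pvWrap (t + 1 + k)) (List.range xs.length)
        = List.map ((fun k => pvWrap (t + k)) ∘ Nat.succ) (List.range xs.length) := by
      apply List.map_congr_left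
      intro k _
      simp only [Function.comp_apply]
      exact congrArg pvWrap (by omega)
    rw [hmap]
    simp

-- B's row formula equals A's row content expressed with pvWrap/pvT
theorem pvRow_eq (m r : Nat) (hr : r < m) :
    pvRow (m : Int) (r : Int)
      = List.replicate (m - 1 - r) (-1 : Int)
          ++ (List.range (r + 1)).map (fun k => pvWrap (pvT r + k)) := by
  unfold pvRow
  rw [show ((m : Int) - 1 - (r : Int)).toNat = m - 1 - r by omega]
  congr 1
  rw [show ((r : Int) + 1) = ((r + 1 : Nat) : Int) by push_cast; ring,
      PySem.List.pyRange_zero_nat (r + 1), List.map_map]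
  apply List.map_congr_left
  intro x _
  simp only [Function.comp_apply]
  rw [show (r : Int) * ((r + 1 : Nat) : Int) = ((r * (r + 1) : Nat) : Int) by push_cast; ring]
  rw [show ((2 : Int) = ((2 : Nat) : Int)) by norm_num, PySem.Int.floordiv_natCast]
  rw [show ((r * (r + 1) / 2 : Nat) : Int) + (x : Int)
        = ((r * (r + 1) / 2 + x : Nat) : Int) by push_cast; ring]
  rw [pvWrap_eq_mod]
  rfl

-- one whole inner loop of A, for outer index i = m-1-r (row r of m)
theorem inner_row (m r : Nat) (hr : r < m) (t : Nat) :
    (PySem.List.pyRange 0 (m : Int) 1).foldl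
        (pvInnerStep ((m : Int) - 1 - (r : Nat))) (pvWrap t, [])
      = (pvWrap (t + (r + 1)),
         List.replicate (m - 1 - r) (-1 : Int)
           ++ (List.range (r + 1)).map (fun k => pvWrap (t + k))) := by
  have hi0 : (0 : Int) ≤ (m : Int) - 1 - r := by omega
  have him : (m : Int) - 1 - r ≤ (m : Int) := by omega
  rw [PySem.List.pyRange_one_append 0 ((m : Int) - 1 - r) (m : Int) hi0 him,
      List.foldl_append]
  rw [inner_skip _ _ (fun j hj => (PySem.List.mem_pyRange_one.mp hj).2)]
  rw [inner_fill _ _ (fun j hj h => absurd (PySem.List.mem_pyRange_one.mp hj).1 (by omega))]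
  simp only [PySem.List.length_pyRange_one, List.nil_append, sub_zero]
  rw [show ((m : Int) - 1 - r).toNat = m - 1 - r by omega,
      show ((m : Int) - ((m : Int) - 1 - r)).toNat = r + 1 by omega]

-- the outer loop of A, starting at row r with counter pvWrap (pvT r), produces exactly B's rows r..m-1
theorem outer_inv (m : Nat) :
    ∀ (k r : Nat), r + k = m → ∀ (B : List (List Int)),
      (PySem.List.pyRange ((m : Int) - 1 - r) (-1) (-1)).foldl
          (pvOuterStep (m : Int)) (pvWrap (pvT r), B)
        = (pvWrap (pvT m),
           B ++ (PySem.List.pyRange (r : Int) (m : Int) 1).map (pvRow (m : Int))) := by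
  intro k
  induction k with
  | zero =>
    intro r hrm B
    rw [PySem.List.pyRange_neg_one_eq_nil (by omega : (m : Int) - 1 - (r : Nat) ≤ -1)]
    rw [PySem.List.pyRange_one_eq_nil (by omega : (m : Int) ≤ (r : Int))]
    simp only [List.foldl_nil, List.map_nil, List.append_nil]
    rw [show pvT r = pvT m from congrArg pvT (by omega)]
  | succ k ih =>
    intro r hrm B
    have hrlt : r < m := by omega
    rw [PySem.List.pyRange_neg_one_cons (by omega : (-1 : Int) < (m : Int) - 1 - r)]
    rw [List.foldl_cons]
    have hstep :
        pvOuterStep (m : Int) (pvWrap (pvT r), B) ((m : Int) - 1 - r)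
          = (pvWrap (pvT (r + 1)), B ++ [pvRow (m : Int) (r : Int)]) := by
      unfold pvOuterStep
      rw [inner_row m r hrlt (pvT r), pvT_succ r, pvRow_eq m r hrlt]
    rw [hstep]
    have hcast : (m : Int) - 1 - (r : Nat) - 1 = (m : Int) - 1 - ((r + 1 : Nat) : Int) := by
      push_cast; ring
    rw [hcast, ih (r + 1) (by omega) (B ++ [pvRow (m : Int) (r : Int)])]
    rw [PySem.List.pyRange_one_cons (by omega : (r : Int) < (m : Int))]
    have hc1 : ((r : Int) + 1) = ((r + 1 : Nat) : Int) := by push_cast; ring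
    rw [hc1]
    simp only [List.map_cons, List.append_assoc, List.singleton_append]

-- ===== VERDICT (by name: the statement is the Claim_ definition above) =====
theorem numberPattern_spec : Claim_equal_numberPattern := by
  intro n _
  unfold Spec_numberPattern numberPattern numberPattern_alt
  by_cases hn : n ≤ 0
  · rw [PySem.List.pyRange_neg_one_eq_nil (by omega : n - 1 ≤ -1),
        PySem.List.pyRange_one_eq_nil (by omega : n ≤ 0)]
    simp
  · have hm : n = ((n.toNat : Nat) : Int) := by omega
    rw [hm]
    have h := outer_inv n.toNat n.toNat 0 (by omega) []
    simp only [Nat.cast_zero, sub_zero, List.nil_append] at h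
    have h0 : pvWrap (pvT 0) = 1 := by decide
    rw [h0] at h
    rw [h]
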